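-- pv_equiv track=rewrite | github.com/Wtfkunxl/career-intelligence-dashboard | career_intelligence/roadmap/generator.py | generate_roadmap
-- ===== SOURCE A (Python) =====
-- def generate_roadmap(missing_skills):
--     """
--     Distributes missing skills across 3 months.
--     """
--     if not missing_skills:
--         return {}
--
--     # Basic clean up
--     skills = sorted(list(set(missing_skills)))
--     n = len(skills)
--
--     roadmap = {
--         "Month 1": [],
--         "Month 2": [],
--         "Month 3": []
--     }
--
--     # Dynamic distribution
--     for i, skill in enumerate(skills):
--         if i % 3 == 0:
--             roadmap["Month 1"].append(skill)
--         elif i % 3 == 1: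
--             roadmap["Month 2"].append(skill)
--         else:
--             roadmap["Month 3"].append(skill)
--
--     return roadmap
-- ===== SOURCE B (Python) =====
-- def generate_roadmap(missing_skills):
--     """
--     Distributes missing skills across 3 months.
--     """
--     if not missing_skills:
--         return {}
--
--     skills = sorted(set(missing_skills))
--     return {
--         "Month 1": skills[0::3],
--         "Month 2": skills[1::3],
--         "Month 3": skills[2::3],
--     }
-- ===== Notes on version B (the rewrite author's own statement) =====
-- stated objective: idiomatic
-- what changed: Replaces the enumerate loop that dispatches each skill by i % 3 into pre-initialized dict lists with a direct dict display whose month lists are extracted whole as strided slices skills[0::3], skills[1::3], skills[2::3].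
import Mathlib
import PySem

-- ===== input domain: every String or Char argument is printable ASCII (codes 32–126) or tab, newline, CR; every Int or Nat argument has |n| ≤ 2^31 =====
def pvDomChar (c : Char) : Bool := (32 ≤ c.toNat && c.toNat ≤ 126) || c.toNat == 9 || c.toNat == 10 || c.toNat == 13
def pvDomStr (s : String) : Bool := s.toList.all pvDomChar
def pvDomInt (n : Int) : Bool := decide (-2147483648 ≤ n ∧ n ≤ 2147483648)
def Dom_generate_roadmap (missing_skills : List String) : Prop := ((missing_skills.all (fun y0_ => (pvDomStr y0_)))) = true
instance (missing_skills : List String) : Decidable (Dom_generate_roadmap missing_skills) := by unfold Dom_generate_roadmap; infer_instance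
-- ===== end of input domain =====

-- B replaces A's per-element i % 3 dispatch loop with a dict display of three strided slices (idiomatic; same cost).

-- ===== PORT A =====
-- loop body of A's 'for i, skill in enumerate(skills)'
def roadmapStep (r : PySem.Dict String (List String)) (p : Int × String) : PySem.Dict String (List String) :=
  if PySem.Int.mod p.1 3 == 0 then r.modify "Month 1" [] (fun l => l ++ [p.2])
  else if PySem.Int.mod p.1 3 == 1 then r.modify "Month 2" [] (fun l => l ++ [p.2])
  else r.modify "Month 3" [] (fun l => l ++ [p.2])

def generate_roadmap (missing_skills : List String) : List (String × List String) :=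
  if missing_skills.isEmpty then []
  else
    let skills := PySem.List.sorted (PySem.Set.ofList missing_skills) (fun x => x) false
    let _n := skills.length
    let roadmap : PySem.Dict String (List String) :=
      PySem.Dict.ofList [("Month 1", []), ("Month 2", []), ("Month 3", [])]
    ((PySem.List.enumerate skills 0).foldl roadmapStep roadmap).items

-- ===== PORT B =====
def generate_roadmap_alt (missing_skills : List String) : List (String × List String) :=
  if missing_skills.isEmpty then []
  else
    let skills := PySem.List.sorted (PySem.Set.ofList missing_skills) (fun x => x) false
    [("Month 1", (PySem.List.slice? skills (some 0) none 3).getD []),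
     ("Month 2", (PySem.List.slice? skills (some 1) none 3).getD []),
     ("Month 3", (PySem.List.slice? skills (some 2) none 3).getD [])]

-- ===== PRECONDITION & SPEC =====
def Spec_generate_roadmap (missing_skills : List String) (out : List (String × List String)) : Prop := out = generate_roadmap_alt missing_skills
instance (missing_skills : List String) (out : List (String × List String)) : Decidable (Spec_generate_roadmap missing_skills out) := by unfold Spec_generate_roadmap; infer_instance

-- ===== CLAIM (what is proved, stated in full; the proofs are below) =====
def Claim_equal_generate_roadmap : Prop := ∀ (missing_skills : List String), Dom_generate_roadmap missing_skills → Spec_generate_roadmap missing_skills (generate_roadmap missing_skills)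

-- ===== LEMMAS AND PROOFS =====

-- elements of s at positions p (counting from k) with (k + p) % 3 = r: what A's loop sends to month r+1
def pick (r : Nat) : Nat → List String → List String
  | _, [] => []
  | k, x :: t => if k % 3 = r then x :: pick r (k + 1) t else pick r (k + 1) t

-- every third element, starting with the first: the stride-3 selection
def every3 : List String → List String
  | [] => []
  | x :: t => x :: every3 (t.drop 2)
termination_by l => l.length
decreasing_by simp

@[simp] theorem every3_nil : every3 [] = [] := by rw [every3]

@[simp] theorem every3_cons (x : String) (t : List String) :
    every3 (x :: t) = x :: every3 (t.drop 2) := by rw [every3]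

theorem pick_eq_every3 (r : Nat) (hr : r < 3) :
    ∀ (s : List String) (k : Nat), k % 3 = r → pick r k s = every3 s := by
  intro s
  induction s using every3.induct with
  | case1 => intro k _; simp [pick]
  | case2 x t ih =>
    intro k hk
    match t with
    | [] => simp [pick, hk]
    | [y] =>
      simp [pick, hk]
      omega
    | y :: z :: u =>
      have h1 : ¬ (k + 1) % 3 = r := by omega
      have h2 : ¬ (k + 2) % 3 = r := by omega
      have h3 : (k + 3) % 3 = r := by omega
      simp only [pick, hk, if_pos, every3, List.drop]
      rw [if_neg h1, show k + 1 + 1 = k + 2 by omega, if_neg h2,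
          show k + 2 + 1 = k + 3 by omega]
      simpa using ih (k + 3) h3

theorem fold_roadmap (s : List String) : ∀ (k : Nat) (a b c : List String),
    (PySem.List.enumerate s (k : Int)).foldl roadmapStep
      (PySem.Dict.mk [("Month 1", a), ("Month 2", b), ("Month 3", c)]) =
    PySem.Dict.mk [("Month 1", a ++ pick 0 k s), ("Month 2", b ++ pick 1 k s),
                   ("Month 3", c ++ pick 2 k s)] := by
  induction s with
  | nil => intro k a b c; simp [PySem.List.enumerate, pick]
  | cons x t ih =>
    intro k a b c
    rw [PySem.List.enumerate_cons, List.foldl_cons]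
    have hmod : PySem.Int.mod (k : Int) 3 = ((k % 3 : Nat) : Int) := by
      exact_mod_cast PySem.Int.mod_natCast k 3
    have hk1 : ((k : Int) + 1) = ((k + 1 : Nat) : Int) := by push_cast; ring
    have hstep : roadmapStep (PySem.Dict.mk [("Month 1", a), ("Month 2", b), ("Month 3", c)]) ((k : Int), x) =
        PySem.Dict.mk [("Month 1", if k % 3 = 0 then a ++ [x] else a),
                       ("Month 2", if k % 3 = 1 then b ++ [x] else b),
                       ("Month 3", if k % 3 = 2 then c ++ [x] else c)] := by
      have h3 : k % 3 = 0 ∨ k % 3 = 1 ∨ k % 3 = 2 := by omega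
      rcases h3 with h | h | h <;>
        simp only [roadmapStep, hmod, h] <;> norm_num <;>
        simp [PySem.Dict.modify, PySem.Dict.insert, PySem.Dict.getD, PySem.Dict.get?]
    rw [hstep, hk1, ih]
    have h3 : k % 3 = 0 ∨ k % 3 = 1 ∨ k % 3 = 2 := by omega
    rcases h3 with h | h | h <;>
      simp [pick, h]

theorem filterMap_stride (ys : List String) :
    List.filterMap (fun k => ys[3 * k]?) (List.range ((ys.length + 2) / 3)) = every3 ys := by
  induction ys using every3.induct with
  | case1 => simp
  | case2 x t ih =>
    have hc : ((x :: t).length + 2) / 3 = ((t.drop 2).length + 2) / 3 + 1 := by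
      simp [List.length_drop]; omega
    rw [hc, List.range_succ_eq_map, List.filterMap_cons]
    simp only [Nat.mul_zero, List.getElem?_cons_zero]
    rw [List.filterMap_map]
    have hfun : ∀ k : Nat, ((x :: t)[3 * Nat.succ k]?) = (t.drop 2)[3 * k]? := by
      intro k
      rw [List.getElem?_drop]
      have : 3 * Nat.succ k = (2 + 3 * k) + 1 := by omega
      rw [this, List.getElem?_cons_succ]
    rw [every3_cons]
    congr 1
    refine (List.filterMap_congr ?_).trans ih
    intro k _
    exact hfun k

theorem slice3_eq_every3 (s : List String) (o : Nat) (ho : o < 3) :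
    (PySem.List.slice? s (some (o : Int)) none 3).getD [] = every3 (s.drop o) := by
  have h30 : ¬ ((3:Int) = 0) := by norm_num
  have h3n : ¬ ((3:Int) < 0) := by norm_num
  have hno : ¬ ((o:Int) < 0) := by omega
  unfold PySem.List.slice? PySem.List.sliceIndices
  simp only [if_neg h30, if_neg h3n, if_neg hno, Option.getD_some,
    if_pos (show (0:Int) < 3 by norm_num)]
  by_cases hn : s.length ≤ o
  · rw [min_eq_right (by exact_mod_cast hn), if_neg (by omega),
      List.drop_eq_nil_of_le hn]
    simp
  · push Not at hn
    rw [min_eq_left (by exact_mod_cast hn.le), if_pos (by exact_mod_cast hn)]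
    have hcast : (s.length:Int) - o + 3 - 1 = (((s.drop o).length + 2 : Nat) : Int) := by
      rw [List.length_drop]; push_cast; omega
    rw [hcast]
    have hcount : ((((s.drop o).length + 2 : Nat) : Int) / 3).toNat
        = ((s.drop o).length + 2) / 3 := rfl
    rw [hcount]
    have hidx : ∀ k : Nat, k ∈ List.range (((s.drop o).length + 2) / 3) →
        s[((o:Int) + 3 * (k:Int)).toNat]? = (s.drop o)[3 * k]? := by
      intro k _
      rw [List.getElem?_drop, show ((o:Int) + 3 * (k:Int)).toNat = o + 3 * k by omega]
    rw [List.filterMap_congr hidx, filterMap_stride]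

theorem generate_roadmap_spec : Claim_equal_generate_roadmap := by
  intro ms _
  unfold Spec_generate_roadmap generate_roadmap generate_roadmap_alt
  by_cases h : ms.isEmpty
  · simp [h]
  · simp only [h, if_neg, Bool.false_eq_true, not_false_eq_true]
    set s := PySem.List.sorted (PySem.Set.ofList ms) (fun x => x) false with hs
    have hofList : (PySem.Dict.ofList [("Month 1", ([] : List String)), ("Month 2", []), ("Month 3", [])]) =
        PySem.Dict.mk [("Month 1", []), ("Month 2", []), ("Month 3", [])] := by decide
    rw [hofList]
    have := fold_roadmap s 0 [] [] []
    rw [show ((0 : Nat) : Int) = (0 : Int) by simp] at this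
    rw [this]
    have e0 := slice3_eq_every3 s 0 (by omega)
    have e1 := slice3_eq_every3 s 1 (by omega)
    have e2 := slice3_eq_every3 s 2 (by omega)
    simp only [Nat.cast_zero, Nat.cast_one, Nat.cast_ofNat] at e0 e1 e2
    have p0 : pick 0 0 s = every3 s := by
      simpa using pick_eq_every3 0 (by omega) s 0 (by omega)
    have p1 : pick 1 0 s = every3 (s.drop 1) := by
      cases s with
      | nil => simp [pick]
      | cons x t => simp [pick]; exact pick_eq_every3 1 (by omega) t 1 (by omega)
    have p2 : pick 2 0 s = every3 (s.drop 2) := by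
      cases s with
      | nil => simp [pick]
      | cons x t =>
        cases t with
        | nil => simp [pick]
        | cons y u => simp [pick]; exact pick_eq_every3 2 (by omega) u 2 (by omega)
    simp [p0, p1, p2, e0, e1, e2]
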